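-- pv_equiv track=rewrite | github.com/vinicius-vs/base64 | Base64.py | converter_caracter_para_decimal
-- ===== SOURCE A (Python) =====
-- def converter_caracter_para_decimal(texto):
--     tabela64 = ['A', 'B', 'C', 'D', 'E', 'F', 'G', 'H', 'I', 'J', 'K', 'L', 'M', 'N', 'O', 'P', 'Q', 'R', 'S', 'T', 'U',
--                 'V', 'W', 'X', 'Y', 'Z',
--                 'a', 'b', 'c', 'd', 'e', 'f', 'g', 'h', 'i', 'j', 'k', 'l', 'm', 'n', 'o', 'p', 'q', 'r', 's', 't', 'u',
--                 'v', 'w', 'x', 'y', 'z',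
--                 '0', '1', '2', '3', '4', '5', '6', '7', '8', '9', '+', '/']
--     decimal = []
--     for i in range(len(texto)):
--         for a in range(len(tabela64)):
--             if texto[i]==tabela64[a]:
--                 decimal.append(a)
--                 break
--     return decimal
-- ===== SOURCE B (Python) =====
-- def converter_caracter_para_decimal(texto):
--     decimal = []
--     for c in texto:
--         o = ord(c)
--         if 65 <= o <= 90:        # 'A'-'Z'
--             decimal.append(o - 65)
--         elif 97 <= o <= 122:     # 'a'-'z'
--             decimal.append(o - 71)
--         elif 48 <= o <= 57:      # '0'-'9'
--             decimal.append(o + 4)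
--         elif c == '+':
--             decimal.append(62)
--         elif c == '/':
--             decimal.append(63)
--     return decimal
-- ===== Notes on version B (the rewrite author's own statement) =====
-- stated objective: faster
-- what changed: Replaces the per-character linear scan of a 64-entry table with closed-form ord-range arithmetic (five range tests) to compute each index directly.
import Mathlib
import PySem

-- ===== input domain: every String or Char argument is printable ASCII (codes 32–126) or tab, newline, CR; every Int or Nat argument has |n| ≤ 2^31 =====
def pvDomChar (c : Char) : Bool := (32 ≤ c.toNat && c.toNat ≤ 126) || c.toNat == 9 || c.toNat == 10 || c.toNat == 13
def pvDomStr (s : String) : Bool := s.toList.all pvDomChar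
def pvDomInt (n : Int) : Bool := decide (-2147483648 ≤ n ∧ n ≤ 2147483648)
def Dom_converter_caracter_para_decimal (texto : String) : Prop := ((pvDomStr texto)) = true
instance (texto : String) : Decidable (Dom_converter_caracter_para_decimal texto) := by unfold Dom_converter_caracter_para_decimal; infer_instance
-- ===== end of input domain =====

-- B replaces A's per-character linear scan of the 64-entry base64 table by closed-form ord-range arithmetic.

-- ===== PORT A =====
-- A's literal table
def pvTabela64 : List Char :=
  ['A','B','C','D','E','F','G','H','I','J','K','L','M','N','O','P','Q','R','S','T','U',
   'V','W','X','Y','Z',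
   'a','b','c','d','e','f','g','h','i','j','k','l','m','n','o','p','q','r','s','t','u',
   'v','w','x','y','z',
   '0','1','2','3','4','5','6','7','8','9','+','/']

-- A's inner 'for a in range(len(tabela64)): if texto[i]==tabela64[a]: … break' loop:
-- first index whose table entry equals the char (none = no match, nothing appended)
def pvScan (c : Char) : List Char → Int → Option Int
  | [], _ => none
  | x :: rest, a => if c = x then some a else pvScan c rest (a + 1)

-- A's step for one character of the outer loop
def pvStepA (decimal : List Int) (c : Char) : List Int :=
  match pvScan c pvTabela64 0 with
  | some a => decimal ++ [a]
  | none => decimal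

def converter_caracter_para_decimal (texto : String) : List Int :=
  texto.toList.foldl pvStepA []

-- ===== PORT B =====
-- B's step: classify the char by ord ranges and append the computed index
def pvStepB (decimal : List Int) (c : Char) : List Int :=
  let o : Int := c.toNat
  if 65 ≤ o ∧ o ≤ 90 then decimal ++ [o - 65]
  else if 97 ≤ o ∧ o ≤ 122 then decimal ++ [o - 71]
  else if 48 ≤ o ∧ o ≤ 57 then decimal ++ [o + 4]
  else if c = '+' then decimal ++ [62]
  else if c = '/' then decimal ++ [63]
  else decimal

def converter_caracter_para_decimal_alt (texto : String) : List Int :=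
  texto.toList.foldl pvStepB []

-- ===== PRECONDITION & SPEC =====
def Spec_converter_caracter_para_decimal (texto : String) (out : List Int) : Prop := out = converter_caracter_para_decimal_alt texto
instance (texto : String) (out : List Int) : Decidable (Spec_converter_caracter_para_decimal texto out) := by unfold Spec_converter_caracter_para_decimal; infer_instance

-- ===== CLAIM (what is proved, stated in full; the proofs are below) =====
def Claim_equal_converter_caracter_para_decimal : Prop := ∀ (texto : String), Dom_converter_caracter_para_decimal texto → Spec_converter_caracter_para_decimal texto (converter_caracter_para_decimal texto)

-- ===== LEMMAS AND PROOFS =====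

-- char equality is code-point equality
theorem pv_char_eq_iff_toNat (c d : Char) : (c = d) ↔ (c.toNat = d.toNat) :=
  ⟨fun h => h ▸ rfl, fun h => by
    have := congrArg Char.ofNat h
    rwa [Char.ofNat_toNat, Char.ofNat_toNat] at this⟩

-- the table scan, carried out on code points
def pvScanN (m : Nat) : List Nat → Int → Option Int
  | [], _ => none
  | x :: rest, a => if m = x then some a else pvScanN m rest (a + 1)

theorem pvScan_toNat (c : Char) (l : List Char) (a : Int) :
    pvScan c l a = pvScanN c.toNat (l.map Char.toNat) a := by
  induction l generalizing a with
  | nil => rfl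
  | cons x rest ih =>
    simp only [pvScan, pvScanN, List.map_cons, pv_char_eq_iff_toNat]
    split_ifs with h
    · rfl
    · exact ih (a + 1)

-- the table's code points, as three consecutive runs plus the two symbols
theorem pvTabela64_codes :
    pvTabela64.map Char.toNat =
      (List.range 26).map (65 + ·) ++ (List.range 26).map (97 + ·) ++
        (List.range 10).map (48 + ·) ++ [43, 47] := by
  simp [pvTabela64, List.range]
  rfl

-- scanning a consecutive run of codes
theorem pvScanN_run (m : Nat) (len : Nat) (s : Nat) (a : Int) (rest : List Nat) :
    pvScanN m ((List.range len).map (s + ·) ++ rest) a =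
      if s ≤ m ∧ m < s + len then some (a + ((m : Int) - s))
      else pvScanN m rest (a + len) := by
  induction len generalizing s a with
  | zero => simp
  | succ k ih =>
    rw [List.range_succ_eq_map]
    simp only [List.map_cons, List.map_map, List.cons_append, pvScanN]
    have hmap : ((fun x => s + x) ∘ Nat.succ) = (fun x => (s + 1) + x) := by
      funext j; simp; omega
    rw [hmap, ih (s + 1) (a + 1)]
    split_ifs with h1 h2 h2 <;>
      first
        | (simp only [Option.some.injEq]; subst h1; ring)
        | (simp only [Option.some.injEq]; omega)
        | (exfalso; omega)
        | (congr 1; omega)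

-- scanning the two leftover symbol codes
theorem pvScanN_tail (m : Nat) (a : Int) :
    pvScanN m [43, 47] a = if m = 43 then some a else if m = 47 then some (a + 1) else none := rfl

-- the full scan equals B's ord-range classification, for every character
theorem pvScan_eq_delta (c : Char) :
    pvScan c pvTabela64 0 =
      (if 65 ≤ (c.toNat : Int) ∧ (c.toNat : Int) ≤ 90 then some ((c.toNat : Int) - 65)
       else if 97 ≤ (c.toNat : Int) ∧ (c.toNat : Int) ≤ 122 then some ((c.toNat : Int) - 71)
       else if 48 ≤ (c.toNat : Int) ∧ (c.toNat : Int) ≤ 57 then some ((c.toNat : Int) + 4)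
       else if c = '+' then some 62
       else if c = '/' then some 63
       else none) := by
  rw [pvScan_toNat, pvTabela64_codes]
  rw [List.append_assoc, List.append_assoc, pvScanN_run, pvScanN_run, pvScanN_run, pvScanN_tail]
  simp only [pv_char_eq_iff_toNat, show ('+').toNat = 43 from rfl, show ('/').toNat = 47 from rfl]
  split_ifs <;>
    first
      | (simp only [Option.some.injEq]; push_cast; omega)
      | rfl
      | (exfalso; omega)

theorem pvStep_agree (d : List Int) (c : Char) : pvStepA d c = pvStepB d c := by
  unfold pvStepA pvStepB
  dsimp only
  rw [pvScan_eq_delta c]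
  split_ifs <;> rfl

-- ===== VERDICT (by name: the statement is the Claim_ definition above) =====
theorem converter_caracter_para_decimal_spec : Claim_equal_converter_caracter_para_decimal := by
  intro texto _
  unfold Spec_converter_caracter_para_decimal converter_caracter_para_decimal converter_caracter_para_decimal_alt
  have : pvStepA = pvStepB := funext fun d => funext fun c => pvStep_agree d c
  rw [this]
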